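-- pv_equiv track=rewrite | github.com/jadwiga22/wmiuwr | SI/p1/z04.py | opt_dist
-- ===== SOURCE A (Python) =====
-- def opt_dist(xs, d):
--     ones_left = 0
--     ones_right = 0
--     ones_center = 0
--
--     for i in range(len(xs)):
--         if xs[i] == "1":
--             if i < d:
--                 ones_center +=1
--             else:
--                 ones_right += 1
--
--     min_ops = d-ones_center + ones_right
--
--     for j in range(d, len(xs)):
--         if xs[j-d] == "1":
--             ones_left += 1
--             ones_center -=1
--         if xs[j] == "1":
--             ones_center += 1
--             ones_right -= 1
--
--         min_ops = min(min_ops, d-ones_center + ones_right + ones_left)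
--
--     return min_ops
-- ===== SOURCE B (Python) =====
-- def opt_dist(xs, d):
--     n = len(xs)
--     pref = [0]
--     for c in xs:
--         pref.append(pref[-1] + (c == "1"))
--     total = pref[n]
--     if d >= n:
--         best = total
--     else:
--         best = max(pref[s + d] - pref[s] for s in range(n - d + 1))
--     return d + total - 2 * best
-- ===== Notes on version B (the rewrite author's own statement) =====
-- stated objective: alternative
-- what changed: Replaced the two incremental sliding-window counter loops with a prefix-sum table of ones consulted once per window start, returning d + total - 2*max_window_ones; Pre_ excludes d < 0, on which A always raises IndexError.
import Mathlib
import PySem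

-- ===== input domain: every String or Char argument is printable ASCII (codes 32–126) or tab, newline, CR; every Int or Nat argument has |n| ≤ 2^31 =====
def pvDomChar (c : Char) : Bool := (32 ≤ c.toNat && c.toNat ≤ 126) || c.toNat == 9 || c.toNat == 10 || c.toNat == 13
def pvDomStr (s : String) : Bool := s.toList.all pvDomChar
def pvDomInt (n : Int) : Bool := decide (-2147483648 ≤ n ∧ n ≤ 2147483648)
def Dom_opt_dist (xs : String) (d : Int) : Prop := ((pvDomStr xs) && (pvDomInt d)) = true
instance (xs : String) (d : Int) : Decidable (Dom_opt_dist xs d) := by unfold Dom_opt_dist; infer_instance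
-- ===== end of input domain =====

-- B replaces A's two incremental sliding-window counter loops by a prefix-sum table of ones
-- consulted once per window start (alternative decomposition, same O(n) cost).

-- ===== PORT A =====
-- first loop body of A: classify a '1' at index i as center (i < d) or right
def bodyA1 (xs : String) (d : Int) (st : Int × Int) (i : Int) : Int × Int :=
  if (PySem.Str.pyGet? xs i).getD ' ' = '1' then
    (if i < d then (st.1 + 1, st.2) else (st.1, st.2 + 1))
  else st

-- second loop body of A: slide the window one step and update the running minimum;
-- state is (ones_left, ones_center, ones_right, min_ops)
def bodyA2 (xs : String) (d : Int) (st : Int × Int × Int × Int) (j : Int) : Int × Int × Int × Int :=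
  let s1 := if (PySem.Str.pyGet? xs (j - d)).getD ' ' = '1' then (st.1 + 1, st.2.1 - 1) else (st.1, st.2.1)
  let s2 := if (PySem.Str.pyGet? xs j).getD ' ' = '1' then (s1.2 + 1, st.2.2.1 - 1) else (s1.2, st.2.2.1)
  (s1.1, s2.1, s2.2, min st.2.2.2 (d - s2.1 + s2.2 + s1.1))

def opt_dist (xs : String) (d : Int) : Int :=
  let n := PySem.Str.len xs
  let p := (PySem.List.pyRange 0 n 1).foldl (bodyA1 xs d) (0, 0)
  let st := (PySem.List.pyRange d n 1).foldl (bodyA2 xs d) (0, p.1, p.2, d - p.1 + p.2)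
  st.2.2.2

-- ===== PORT B =====
-- pref.append(pref[-1] + (c == "1"))
def prefStep (p : List Int) (c : Char) : List Int :=
  p ++ [PySem.List.pyGetD p (-1) 0 + (if c = '1' then (1 : Int) else 0)]

def opt_dist_alt (xs : String) (d : Int) : Int :=
  let n := PySem.Str.len xs
  let pref := xs.toList.foldl prefStep [0]
  let total := PySem.List.pyGetD pref n 0
  let best :=
    if d ≥ n then total
    else
      (PySem.List.max?
        ((PySem.List.pyRange 0 (n - d + 1) 1).map
          (fun s => PySem.List.pyGetD pref (s + d) 0 - PySem.List.pyGetD pref s 0))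
        (fun x => x)).getD 0
  d + total - 2 * best

-- ===== PRECONDITION & SPEC =====
-- Pre_ excludes d < 0: there A always raises IndexError (xs[j-d] runs past the end).
def Pre_opt_dist (xs : String) (d : Int) : Prop := 0 ≤ d
instance (xs : String) (d : Int) : Decidable (Pre_opt_dist xs d) := by unfold Pre_opt_dist; infer_instance
def pvWitness_opt_dist : String × Int := ("11010", 2)

def Spec_opt_dist (xs : String) (d : Int) (out : Int) : Prop := out = opt_dist_alt xs d
instance (xs : String) (d : Int) (out : Int) : Decidable (Spec_opt_dist xs d out) := by unfold Spec_opt_dist; infer_instance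

-- ===== CLAIM (what is proved, stated in full; the proofs are below) =====
def Claim_equal_opt_dist : Prop := ∀ (xs : String) (d : Int), Dom_opt_dist xs d → Pre_opt_dist xs d → Spec_opt_dist xs d (opt_dist xs d)

-- ===== LEMMAS AND PROOFS =====

-- string lookup = list lookup (definitional)
theorem strGetD (s : String) (i : Int) (c : Char) :
    (PySem.Str.pyGet? s i).getD c = PySem.List.pyGetD s.toList i c := rfl

-- number of '1' characters, as an Int
def onesI (l : List Char) : Int := (l.countP (fun c => c = '1') : ℕ)

-- 0/1 indicator of a single character
def indI (c : Char) : Int := if c = '1' then 1 else 0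

-- ones in the window of length k starting at s
def winI (l : List Char) (k s : ℕ) : Int := onesI ((l.drop s).take k)

-- proof-side mirror of bodyA1, taking the (index, char) pair directly
def bodyG (d : Int) (st : Int × Int) (p : Int × Char) : Int × Int :=
  if p.2 = '1' then (if p.1 < d then (st.1 + 1, st.2) else (st.1, st.2 + 1)) else st

-- functional prefix sums (proof-side mirror of B's pref loop)
def psums (a : Int) : List Char → List Int
  | [] => []
  | c :: t => (a + indI c) :: psums (a + indI c) t

theorem onesI_nil : onesI [] = 0 := rfl

theorem onesI_cons (c : Char) (t : List Char) : onesI (c :: t) = indI c + onesI t := by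
  simp only [onesI, indI, List.countP_cons]
  by_cases h : c = '1' <;> simp [h] <;> omega

theorem onesI_append (a b : List Char) : onesI (a ++ b) = onesI a + onesI b := by
  simp [onesI, List.countP_append]

-- total split at s, window k: l = take s ++ window ++ drop (s+k)
theorem onesI_split (l : List Char) (k s : ℕ) :
    onesI l = onesI (l.take s) + winI l k s + onesI (l.drop (s + k)) := by
  conv_lhs => rw [← List.take_append_drop s l]
  rw [onesI_append]
  have h2 : l.drop s = (l.drop s).take k ++ l.drop (s + k) := by
    rw [← List.drop_drop]
    exact (List.take_append_drop k (l.drop s)).symm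
  rw [h2, onesI_append, winI]
  ring

-- prefix additivity: ones(take (s+k)) = ones(take s) + window s
theorem onesI_take_add (l : List Char) (k s : ℕ) :
    onesI (l.take (s + k)) = onesI (l.take s) + winI l k s := by
  rw [List.take_add, onesI_append, winI]

-- window slide identity
theorem winI_slide (l : List Char) (k s : ℕ) (h : s + k < l.length) :
    winI l k s + indI (l[s + k]'h) = winI l k (s + 1) + indI (l[s]'(by omega)) := by
  cases k with
  | zero => simp [winI, onesI_nil]
  | succ k' =>
      have hs : s < l.length := by omega
      have hdrop : l.drop s = l[s] :: l.drop (s + 1) := List.drop_eq_getElem_cons hs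
      have h1 : (l.drop s).take (k' + 1) = l[s] :: (l.drop (s + 1)).take k' := by
        rw [hdrop, List.take_succ_cons]
      have hidx : (l.drop (s + 1))[k']? = some (l[s + (k' + 1)]'h) := by
        rw [List.getElem?_drop]
        have e : s + 1 + k' = s + (k' + 1) := by omega
        rw [e, List.getElem?_eq_getElem h]
      have h2 : (l.drop (s + 1)).take (k' + 1) = (l.drop (s + 1)).take k' ++ [l[s + (k' + 1)]'h] := by
        rw [List.take_succ, hidx]; rfl
      simp only [winI, h1, h2, onesI_cons, onesI_append]
      simp [onesI_cons, onesI_nil]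
      ring

-- ===== first loop of A =====
theorem loopA1 (d : Int) (l : List Char) :
    ∀ (s oc orr : Int),
      (PySem.List.enumerate l s).foldl (bodyG d) (oc, orr)
      = (oc + onesI (l.take (d - s).toNat), orr + onesI (l.drop (d - s).toNat)) := by
  induction l with
  | nil => intro s oc orr; simp [PySem.List.enumerate_nil, onesI_nil]
  | cons c t ih =>
      intro s oc orr
      rw [PySem.List.enumerate_cons, List.foldl_cons]
      by_cases hc : c = '1'
      · subst hc
        by_cases hs : s < d
        · have hq : (d - s).toNat = (d - (s + 1)).toNat + 1 := by omega
          rw [show bodyG d (oc, orr) (s, '1') = (oc + 1, orr) by simp [bodyG, hs]]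
          rw [ih (s + 1), hq, List.take_succ_cons, List.drop_succ_cons, onesI_cons]
          simp [indI, Prod.ext_iff]
          try omega
        · have hq : (d - s).toNat = 0 := by omega
          have hq1 : (d - (s + 1)).toNat = 0 := by omega
          rw [show bodyG d (oc, orr) (s, '1') = (oc, orr + 1) by simp [bodyG, hs]]
          rw [ih (s + 1), hq, hq1]
          simp [onesI_cons, indI, onesI_nil, Prod.ext_iff]
          try omega
      · rw [show bodyG d (oc, orr) (s, c) = (oc, orr) by simp [bodyG, hc]]
        rw [ih (s + 1)]
        by_cases hs : s < d
        · have hq : (d - s).toNat = (d - (s + 1)).toNat + 1 := by omega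
          rw [hq, List.take_succ_cons, List.drop_succ_cons, onesI_cons]
          simp [indI, hc]
        · have hq : (d - s).toNat = 0 := by omega
          have hq1 : (d - (s + 1)).toNat = 0 := by omega
          rw [hq, hq1]
          simp [onesI_cons, indI, hc]

-- ===== second loop of A =====
theorem loopA2 (xs : String) (l : List Char) (hl : xs.toList = l) (k : ℕ) (A : Int)
    (hA : A = (k : Int) + onesI l) :
    ∀ (c : ℕ), c + k ≤ l.length →
      (List.range c).foldl (fun (st : Int × Int × Int × Int) (t : ℕ) => bodyA2 xs (k : Int) st ((k : Int) + (t : Int)))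
        (0, winI l k 0, onesI (l.drop k), A - 2 * winI l k 0)
      = (onesI (l.take c), winI l k c, onesI (l.drop (c + k)),
         (List.range c).foldl (fun (a : Int) (t : ℕ) => min a (A - 2 * winI l k (t + 1))) (A - 2 * winI l k 0)) := by
  intro c
  induction c with
  | zero => intro _; simp [onesI_nil, winI]
  | succ c ih =>
      intro hc
      have hc' : c + k ≤ l.length := by omega
      have hck : c + k < l.length := by omega
      have hcl : c < l.length := by omega
      simp only [List.range_succ, List.foldl_append, List.foldl_cons, List.foldl_nil]
      rw [ih hc']
      have g1 : (PySem.Str.pyGet? xs (((k : Int) + (c : Int)) - (k : Int))).getD ' ' = l[c] := by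
        rw [strGetD, hl]
        have e1 : ((k : Int) + (c : Int)) - (k : Int) = ((c : ℕ) : Int) := by ring
        rw [e1, PySem.List.pyGetD_natCast, List.getD_eq_getElem _ _ hcl]
      have g2 : (PySem.Str.pyGet? xs ((k : Int) + (c : Int))).getD ' ' = l[c + k]'hck := by
        rw [strGetD, hl]
        have e2 : (k : Int) + (c : Int) = (((c + k : ℕ)) : Int) := by push_cast; ring
        rw [e2, PySem.List.pyGetD_natCast, List.getD_eq_getElem _ _ hck]
      have htake : onesI (l.take (c + 1)) = onesI (l.take c) + indI (l[c]) := by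
        rw [List.take_succ, List.getElem?_eq_getElem hcl, onesI_append]
        simp [onesI_cons, onesI_nil]
      have hdropk : onesI (l.drop (c + k)) = indI (l[c + k]'hck) + onesI (l.drop (c + 1 + k)) := by
        rw [List.drop_eq_getElem_cons hck, onesI_cons]
        have e : c + k + 1 = c + 1 + k := by omega
        rw [e]
      have hslide := winI_slide l k c hck
      have hsplit := onesI_split l k (c + 1)
      simp only [bodyA2, g1, g2]
      by_cases h1 : l[c] = '1' <;> by_cases h2 : (l[c + k]'hck) = '1' <;>
        simp only [h1, h2, if_true, if_false, reduceIte] <;>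
        simp only [indI, h1, h2, if_true, if_false, reduceIte] at htake hdropk hslide <;>
        refine Prod.ext ?_ (Prod.ext ?_ (Prod.ext ?_ ?_)) <;>
        simp only [] <;>
        omega

-- ===== B's prefix list =====
theorem prefEq (l : List Char) :
    ∀ (p0 : List Int) (h : p0 ≠ []),
      l.foldl prefStep p0 = p0 ++ psums (p0.getLast h) l := by
  induction l with
  | nil => intro p0 h; simp [psums]
  | cons c t ih =>
      intro p0 h
      rw [List.foldl_cons]
      have hne : prefStep p0 c ≠ [] := by simp [prefStep]
      rw [ih _ hne]
      have hlast2 : (prefStep p0 c).getLast hne = p0.getLast h + indI c := by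
        unfold prefStep
        rw [List.getLast_append_of_ne_nil _ (by simp)]
        rw [PySem.List.pyGetD_neg_one p0 0 h]
        simp [indI]
      rw [hlast2]
      simp [prefStep, psums, indI, PySem.List.pyGetD_neg_one p0 0 h]

theorem psums_getElem? (l : List Char) :
    ∀ (a : Int) (i : ℕ), i < l.length →
      (psums a l)[i]? = some (a + onesI (l.take (i + 1))) := by
  induction l with
  | nil => intro a i h; simp at h
  | cons c t ih =>
      intro a i h
      cases i with
      | zero => simp [psums, onesI_cons, onesI_nil]
      | succ i =>
          have ht : i < t.length := by simpa using h
          simp only [psums, List.getElem?_cons_succ, ih _ i ht, List.take_succ_cons, onesI_cons]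
          congr 1
          ring

-- lookup in B's pref list = ones in the prefix
theorem pref_get (l : List Char) (i : ℕ) (hi : i ≤ l.length) :
    PySem.List.pyGetD (l.foldl prefStep [0]) (i : Int) 0 = onesI (l.take i) := by
  rw [prefEq l [0] (by simp), PySem.List.pyGetD_natCast]
  cases i with
  | zero => simp [onesI_nil]
  | succ i =>
      rw [List.getD_eq_getElem?_getD]
      have hcons : ([(0 : Int)] ++ psums (([(0 : Int)].getLast (by simp))) l)
          = (0 : Int) :: psums 0 l := by rfl
      rw [hcons, List.getElem?_cons_succ, psums_getElem? l 0 i (by omega)]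
      simp

-- min/max duality over a common index list
theorem minmax (js : List ℕ) (f : ℕ → Int) (A : Int) :
    ∀ (x : Int),
      js.foldl (fun a t => min a (A - 2 * f t)) (A - 2 * x)
      = A - 2 * js.foldl (fun a t => max a (f t)) x := by
  induction js with
  | nil => intro x; simp
  | cons j t ih =>
      intro x
      simp only [List.foldl_cons]
      have h : min (A - 2 * x) (A - 2 * f j) = A - 2 * max x (f j) := by omega
      rw [h, ih]

-- ===== VERDICT (by name: the statement is the Claim_ definition above) =====
theorem opt_dist_spec : Claim_equal_opt_dist := by
  intro xs d _ hpre
  unfold Pre_opt_dist at hpre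
  unfold Spec_opt_dist
  obtain ⟨k, rfl⟩ : ∃ k : ℕ, d = (k : Int) := ⟨d.toNat, (Int.toNat_of_nonneg hpre).symm⟩
  simp only [opt_dist, opt_dist_alt, PySem.Str.len_eq]
  set l := xs.toList with hl
  -- first loop of A
  have hGpair : (PySem.List.pyRange 0 ((l.length : Int)) 1).foldl (bodyA1 xs (k : Int)) (0, 0)
      = ((onesI (l.take k), onesI (l.drop k)) : Int × Int) := by
    have h0 : (PySem.List.pyRange 0 (PySem.List.len l) 1).foldl (bodyA1 xs (k : Int)) (0, 0)
        = (PySem.List.enumerate l).foldl (bodyG (k : Int)) (0, 0) := by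
      rw [PySem.List.enumerate_eq_map_pyRange l ' ', List.foldl_map]
      rfl
    rw [PySem.List.len_eq] at h0
    rw [h0, loopA1 (k : Int) l 0 0 0]
    have e : ((k : Int) - 0).toNat = k := by omega
    rw [e]
    norm_num
  simp only [hGpair]
  -- total in B
  have htotal : PySem.List.pyGetD (l.foldl prefStep [0]) ((l.length : Int)) 0 = onesI l := by
    rw [pref_get l l.length le_rfl, List.take_length]
  rw [htotal]
  by_cases hbig : (l.length : Int) ≤ (k : Int)
  · -- d >= n : second loop empty in A, B takes best = total
    have hkm : l.length ≤ k := by exact_mod_cast hbig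
    rw [PySem.List.pyRange_one_eq_nil hbig, if_pos hbig]
    simp only [List.foldl_nil]
    rw [List.take_of_length_le hkm, List.drop_eq_nil_of_le hkm, onesI_nil]
    omega
  · -- d < n : the sliding window case
    have hkm : k < l.length := by exact_mod_cast not_le.mp hbig
    obtain ⟨c, hck⟩ : ∃ c : ℕ, l.length = c + k := ⟨l.length - k, by omega⟩
    -- A's second loop
    have hr2 : PySem.List.pyRange (k : Int) ((l.length : Int)) 1
        = (List.range c).map (fun (t : ℕ) => (k : Int) + (t : Int)) := by
      rw [PySem.List.pyRange_one, show (((l.length : Int)) - (k : Int)).toNat = c from by omega]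
    rw [hr2]
    simp only [List.foldl_map]
    have hinit : ((0 : Int), onesI (l.take k), onesI (l.drop k),
          (k : Int) - onesI (l.take k) + onesI (l.drop k))
        = ((0 : Int), winI l k 0, onesI (l.drop k),
          ((k : Int) + onesI l) - 2 * winI l k 0) := by
      have hw0 : winI l k 0 = onesI (l.take k) := by rw [winI, List.drop_zero]
      have hs0 := onesI_split l k 0
      simp only [Nat.zero_add, List.take_zero, onesI_nil, hw0] at hs0
      rw [hw0]
      refine Prod.ext rfl (Prod.ext rfl (Prod.ext rfl ?_))
      simp only []
      omega
    rw [hinit, loopA2 xs l hl.symm k ((k : Int) + onesI l) rfl c (by omega)]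
    dsimp only
    -- B's best
    have hnbig : ¬ ((k : Int) ≥ (l.length : Int)) := by omega
    rw [if_neg hnbig]
    have hrange : PySem.List.pyRange 0 ((l.length : Int) - (k : Int) + 1) 1
        = 0 :: (List.range c).map (fun (t : ℕ) => (1 : Int) + (t : Int)) := by
      rw [PySem.List.pyRange_one_cons (by omega)]
      rw [PySem.List.pyRange_one, show ((l.length : Int) - (k : Int) + 1 - (0 + 1)).toNat = c from by omega]
      simp
    rw [hrange]
    simp only [List.map_cons, List.map_map]
    rw [PySem.List.max?_id_cons, Option.getD_some]
    simp only [List.foldl_map, Function.comp]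
    -- evaluate pref lookups
    have hf0 : PySem.List.pyGetD (l.foldl prefStep [0]) ((0 : Int) + (k : Int)) 0
        - PySem.List.pyGetD (l.foldl prefStep [0]) (0 : Int) 0 = winI l k 0 := by
      have e0 : ((0 : Int) + (k : Int)) = ((k : ℕ) : Int) := by ring
      have hz : PySem.List.pyGetD (l.foldl prefStep [0]) (0 : Int) 0 = onesI (l.take 0) := by
        exact_mod_cast pref_get l 0 (by omega)
      rw [e0, pref_get l k (by omega), hz]
      simp [winI, onesI_nil]
    rw [hf0]
    have hcong : (List.range c).foldl
        (fun (x : Int) (t : ℕ) => max x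
          (PySem.List.pyGetD (l.foldl prefStep [0]) (((1 : Int) + (t : Int)) + (k : Int)) 0
            - PySem.List.pyGetD (l.foldl prefStep [0]) ((1 : Int) + (t : Int)) 0))
        (winI l k 0)
        = (List.range c).foldl (fun (x : Int) (t : ℕ) => max x (winI l k (t + 1))) (winI l k 0) := by
      apply PySem.List.foldl_congr_mem
      intro acc t htmem
      have htc : t < c := List.mem_range.mp htmem
      have e1 : ((1 : Int) + (t : Int)) + (k : Int) = (((t + 1 + k : ℕ)) : Int) := by push_cast; ring
      have e2 : (1 : Int) + (t : Int) = (((t + 1 : ℕ)) : Int) := by push_cast; ring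
      rw [e1, e2, pref_get l (t + 1 + k) (by omega), pref_get l (t + 1) (by omega)]
      have := onesI_take_add l k (t + 1)
      omega
    rw [hcong]
    exact minmax (List.range c) (fun t => winI l k (t + 1)) ((k : Int) + onesI l) (winI l k 0)
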